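-- pv_equiv track=rewrite | github.com/thiago0f/funcoes-ppdm | funcoes/questao8_calculate_energy_points.py | calculate_energy_points
-- ===== SOURCE A (Python) =====
-- def calculate_energy_points(nivel, itens_magicos):
--     multiplos = set()
--
--     for item in itens_magicos:
--         multiplo = item
--         while multiplo < nivel:
--             multiplos.add(multiplo)
--             multiplo += item
--
--     return sum(multiplos)
-- ===== SOURCE B (Python) =====
-- def calculate_energy_points(nivel, itens_magicos):
--     total = 0
--     for x in range(1, nivel):
--         if any(item != 0 and x % item == 0 for item in itens_magicos):
--             total += x
--     return total
-- ===== Notes on version B (the rewrite author's own statement) =====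
-- stated objective: alternative
-- what changed: Instead of generating each item's multiples into a set and summing it, B makes one forward scan over the candidates 1..nivel-1, adding each candidate divisible by some nonzero item to a running total; no set is built.
import Mathlib
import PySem

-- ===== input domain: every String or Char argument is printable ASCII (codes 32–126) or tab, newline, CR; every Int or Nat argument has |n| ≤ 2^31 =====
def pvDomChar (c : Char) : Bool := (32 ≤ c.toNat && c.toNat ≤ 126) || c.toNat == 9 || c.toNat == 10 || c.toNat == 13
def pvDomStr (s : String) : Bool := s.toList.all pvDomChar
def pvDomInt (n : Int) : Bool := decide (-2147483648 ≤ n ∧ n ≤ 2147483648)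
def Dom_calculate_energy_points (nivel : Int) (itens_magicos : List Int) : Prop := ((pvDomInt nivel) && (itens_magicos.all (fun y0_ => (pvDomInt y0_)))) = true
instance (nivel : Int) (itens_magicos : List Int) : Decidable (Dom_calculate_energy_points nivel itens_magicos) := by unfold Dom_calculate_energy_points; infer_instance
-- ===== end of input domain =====

-- B replaces A's per-item multiple-set generation by a single scan of candidates 1..nivel-1 with a divisibility test (alternative decomposition, no set).


-- ===== PORT A =====
-- the inner 'while multiplo < nivel' loop; fuel (nivel - multiplo).toNat is a pure totality guard
-- (under Pre_ each executed loop has 0 < item, so the fuel never runs out before the condition fails)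
def pvWhileA (nivel item : Int) : Nat → Int → PySem.Set Int → PySem.Set Int
  | 0, _, s => s
  | fuel+1, multiplo, s =>
      if multiplo < nivel then pvWhileA nivel item fuel (multiplo + item) (PySem.Set.add s multiplo)
      else s

def calculate_energy_points (nivel : Int) (itens_magicos : List Int) : Int :=
  (itens_magicos.foldl
    (fun multiplos item => pvWhileA nivel item (nivel - item).toNat item multiplos)
    PySem.Set.empty).sum

-- ===== PORT B =====
def calculate_energy_points_alt (nivel : Int) (itens_magicos : List Int) : Int :=
  (PySem.List.pyRange 1 nivel 1).foldl
    (fun total x =>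
      if itens_magicos.any (fun item => item != 0 && (PySem.Int.mod x item == 0)) then total + x
      else total)
    0

-- ===== PRECONDITION & SPEC =====
-- Pre_ excludes exactly the inputs where A never returns: an item ≤ 0 with item < nivel makes A's
-- inner while loop run forever (multiplo never grows past nivel).
def Pre_calculate_energy_points (nivel : Int) (itens_magicos : List Int) : Prop :=
  ∀ item ∈ itens_magicos, 0 < item ∨ nivel ≤ item
instance (nivel : Int) (itens_magicos : List Int) : Decidable (Pre_calculate_energy_points nivel itens_magicos) := by unfold Pre_calculate_energy_points; infer_instance

def pvWitness_calculate_energy_points : Int × List Int := (10, [3, 5])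

def Spec_calculate_energy_points (nivel : Int) (itens_magicos : List Int) (out : Int) : Prop := out = calculate_energy_points_alt nivel itens_magicos
instance (nivel : Int) (itens_magicos : List Int) (out : Int) : Decidable (Spec_calculate_energy_points nivel itens_magicos out) := by unfold Spec_calculate_energy_points; infer_instance

-- ===== CLAIM (what is proved, stated in full; the proofs are below) =====
def Claim_equal_calculate_energy_points : Prop := ∀ (nivel : Int) (itens_magicos : List Int), Dom_calculate_energy_points nivel itens_magicos → Pre_calculate_energy_points nivel itens_magicos → Spec_calculate_energy_points nivel itens_magicos (calculate_energy_points nivel itens_magicos)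

-- ===== LEMMAS AND PROOFS =====

-- membership in the while-loop's result, for a positive item and sufficient fuel
theorem mem_pvWhileA (nivel item : Int) (hi : 0 < item) :
    ∀ (fuel : Nat) (m : Int) (s : PySem.Set Int), (nivel - m).toNat ≤ fuel →
      ∀ y, (y ∈ pvWhileA nivel item fuel m s ↔ y ∈ s ∨ (m ≤ y ∧ y < nivel ∧ item ∣ (y - m))) := by
  intro fuel
  induction fuel with
  | zero =>
    intro m s hf y
    have hm : nivel ≤ m := by omega
    simp only [pvWhileA]
    constructor
    · exact Or.inl
    · rintro (h | ⟨h1, h2, _⟩)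
      · exact h
      · omega
  | succ f ih =>
    intro m s hf y
    simp only [pvWhileA]
    by_cases hlt : m < nivel
    · rw [if_pos hlt, ih (m + item) (PySem.Set.add s m) (by omega) y, PySem.Set.mem_add]
      constructor
      · rintro ((h | rfl) | ⟨h1, h2, h3⟩)
        · exact Or.inl h
        · exact Or.inr ⟨le_refl _, hlt, by simp⟩
        · refine Or.inr ⟨by omega, h2, ?_⟩
          have : y - m = (y - (m + item)) + item := by ring
          rw [this]; exact dvd_add h3 dvd_rfl
      · rintro (h | ⟨h1, h2, h3⟩)
        · exact Or.inl (Or.inl h)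
        · by_cases hy : y = m
          · exact Or.inl (Or.inr hy)
          · refine Or.inr ⟨?_, h2, ?_⟩
            · have hpos : 0 < y - m := by omega
              have := Int.le_of_dvd hpos h3
              omega
            · have : y - (m + item) = (y - m) - item := by ring
              rw [this]; exact dvd_sub h3 dvd_rfl
    · rw [if_neg hlt]
      constructor
      · exact Or.inl
      · rintro (h | ⟨h1, h2, _⟩)
        · exact h
        · omega

theorem nodup_pvWhileA (nivel item : Int) :
    ∀ (fuel : Nat) (m : Int) (s : PySem.Set Int), s.Nodup → (pvWhileA nivel item fuel m s).Nodup := by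
  intro fuel
  induction fuel with
  | zero => intro m s hs; simpa [pvWhileA] using hs
  | succ f ih =>
    intro m s hs
    simp only [pvWhileA]
    split
    · exact ih _ _ (PySem.Set.nodup_add _ _ hs)
    · exact hs

-- membership in A's folded set
theorem mem_foldA (nivel : Int) (itens : List Int)
    (hpre : ∀ i ∈ itens, 0 < i ∨ nivel ≤ i) :
    ∀ (s : PySem.Set Int) y,
      (y ∈ itens.foldl (fun multiplos item => pvWhileA nivel item (nivel - item).toNat item multiplos) s
        ↔ y ∈ s ∨ ∃ i ∈ itens, 0 < i ∧ i ≤ y ∧ y < nivel ∧ i ∣ y) := by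
  induction itens with
  | nil => intro s y; simp
  | cons i rest ih =>
    intro s y
    have hpre' : ∀ j ∈ rest, 0 < j ∨ nivel ≤ j := fun j hj => hpre j (List.mem_cons_of_mem _ hj)
    rw [List.foldl_cons, ih hpre']
    have hstep : y ∈ pvWhileA nivel i (nivel - i).toNat i s ↔
        y ∈ s ∨ (0 < i ∧ i ≤ y ∧ y < nivel ∧ i ∣ y) := by
      rcases hpre i (List.mem_cons_self) with hi | hi
      · rw [mem_pvWhileA nivel i hi _ i s (le_refl _) y]
        constructor
        · rintro (h | ⟨h1, h2, h3⟩)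
          · exact Or.inl h
          · refine Or.inr ⟨hi, h1, h2, ?_⟩
            have : y = (y - i) + i := by ring
            rw [this]; exact dvd_add h3 dvd_rfl
        · rintro (h | ⟨_, h1, h2, h3⟩)
          · exact Or.inl h
          · refine Or.inr ⟨h1, h2, ?_⟩
            exact dvd_sub h3 dvd_rfl
      · have hfuel : (nivel - i).toNat = 0 := by omega
        rw [hfuel]
        simp only [pvWhileA]
        constructor
        · exact Or.inl
        · rintro (h | ⟨_, h1, h2, _⟩)
          · exact h
          · omega
    rw [hstep]
    constructor
    · rintro ((h | h) | ⟨j, hj, hjs⟩)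
      · exact Or.inl h
      · exact Or.inr ⟨i, List.mem_cons_self, h⟩
      · exact Or.inr ⟨j, List.mem_cons_of_mem _ hj, hjs⟩
    · rintro (h | ⟨j, hj, hjs⟩)
      · exact Or.inl (Or.inl h)
      · rcases List.mem_cons.mp hj with rfl | hj'
        · exact Or.inl (Or.inr hjs)
        · exact Or.inr ⟨j, hj', hjs⟩

theorem nodup_foldA (nivel : Int) (itens : List Int) :
    ∀ (s : PySem.Set Int), s.Nodup →
      (itens.foldl (fun multiplos item => pvWhileA nivel item (nivel - item).toNat item multiplos) s).Nodup := by
  induction itens with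
  | nil => intro s hs; exact hs
  | cons i rest ih => intro s hs; exact ih _ (nodup_pvWhileA _ _ _ _ _ hs)

-- B's accumulator loop sums the filtered candidates
theorem foldl_if_add (p : Int → Bool) :
    ∀ (l : List Int) (t : Int),
      l.foldl (fun total x => if p x then total + x else total) t = t + (l.filter p).sum := by
  intro l
  induction l with
  | nil => intro t; simp
  | cons x xs ih =>
    intro t
    by_cases hx : p x <;> simp [List.foldl_cons, hx, ih, add_assoc]

-- the candidate x passes B's test iff A's set contains it (for x in range, under Pre_)
theorem pred_iff (nivel : Int) (itens : List Int)
    (hpre : ∀ i ∈ itens, 0 < i ∨ nivel ≤ i) (x : Int) :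
    (1 ≤ x ∧ x < nivel ∧ (itens.any fun item => item != 0 && (PySem.Int.mod x item == 0)) = true)
      ↔ ∃ i ∈ itens, 0 < i ∧ i ≤ x ∧ x < nivel ∧ i ∣ x := by
  constructor
  · rintro ⟨hx1, hx2, hany⟩
    rcases List.any_eq_true.mp hany with ⟨i, hi, hcond⟩
    have hcond' : i ≠ 0 ∧ i ∣ x := by
      simpa [PySem.Int.mod_eq_zero_iff_dvd] using hcond
    have h0 : i ≠ 0 := hcond'.1
    have hdvd : i ∣ x := hcond'.2
    have hle : i ≤ x := Int.le_of_dvd (by omega) hdvd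
    rcases hpre i hi with hipos | hbig
    · exact ⟨i, hi, hipos, hle, hx2, hdvd⟩
    · omega
  · rintro ⟨i, hi, hipos, hle, hlt, hdvd⟩
    refine ⟨by omega, hlt, List.any_eq_true.mpr ⟨i, hi, ?_⟩⟩
    simp only [Bool.and_eq_true, bne_iff_ne, beq_iff_eq, PySem.Int.mod_eq_zero_iff_dvd]
    exact ⟨by omega, hdvd⟩

-- ===== VERDICT (by name: the statement is the Claim_ definition above) =====
theorem calculate_energy_points_spec : Claim_equal_calculate_energy_points := by
  intro nivel itens _hdom hpre
  unfold Spec_calculate_energy_points calculate_energy_points calculate_energy_points_alt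
  set p : Int → Bool := fun x => itens.any fun item => item != 0 && (PySem.Int.mod x item == 0) with hp
  rw [foldl_if_add p, zero_add]
  set S := itens.foldl (fun multiplos item => pvWhileA nivel item (nivel - item).toNat item multiplos)
    PySem.Set.empty with hS
  have hnodupS : S.Nodup := nodup_foldA nivel itens PySem.Set.empty List.nodup_nil
  have hnodupF : ((PySem.List.pyRange 1 nivel 1).filter p).Nodup :=
    (PySem.List.nodup_pyRange_one 1 nivel).filter p
  have hmem : ∀ y, y ∈ S ↔ y ∈ (PySem.List.pyRange 1 nivel 1).filter p := by
    intro y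
    rw [hS, mem_foldA nivel itens hpre PySem.Set.empty y, List.mem_filter,
      PySem.List.mem_pyRange_one]
    simp only [PySem.Set.empty, List.not_mem_nil, false_or]
    rw [← pred_iff nivel itens hpre y]
    tauto
  exact List.Perm.sum_eq ((List.perm_ext_iff_of_nodup hnodupS hnodupF).mpr hmem)
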